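-- pv_equiv track=rewrite | github.com/GLO3013-E4/COViRondelle2021 | scripts/src/detection/start_area_detection.py | is_start_area_color
-- ===== SOURCE A (Python) =====
-- def is_start_area_color(red, green, blue):
--     target_colors = {"Red": (255, 0, 0), "Yellow": (255, 255, 0), "Green": (0, 200, 0)}
--
--     def color_difference(color1, color2):
--         return sum([abs(component1 - component2) for component1, component2 in zip(color1, color2)])
--
--     my_color = (red, green, blue)
--     differences = [[color_difference(my_color, target_value), target_name] for target_name, target_value in
--                    target_colors.items()]
--     differences.sort()  # sorted by the first element of inner lists
--     my_color_name = differences[0][1]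
--     return my_color_name == "Green"
-- ===== SOURCE B (Python) =====
-- def is_start_area_color(red, green, blue):
--     # Simpler: compare Green's distance directly against Red's and Yellow's;
--     # <= preserves the sort's alphabetical tie-break (Green sorts first on ties).
--     green_dist = abs(red - 0) + abs(green - 200) + abs(blue - 0)
--     red_dist = abs(red - 255) + abs(green - 0) + abs(blue - 0)
--     yellow_dist = abs(red - 255) + abs(green - 255) + abs(blue - 0)
--     return green_dist <= red_dist and green_dist <= yellow_dist
-- ===== Notes on version B (the rewrite author's own statement) =====
-- stated objective: simpler
-- what changed: Replaces building a list of [distance, name] pairs and sorting it with a direct comparison of Green's distance against Red's and Yellow's (<= encodes the sort's alphabetical tie-break), with no list or sort at all.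
import Mathlib
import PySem

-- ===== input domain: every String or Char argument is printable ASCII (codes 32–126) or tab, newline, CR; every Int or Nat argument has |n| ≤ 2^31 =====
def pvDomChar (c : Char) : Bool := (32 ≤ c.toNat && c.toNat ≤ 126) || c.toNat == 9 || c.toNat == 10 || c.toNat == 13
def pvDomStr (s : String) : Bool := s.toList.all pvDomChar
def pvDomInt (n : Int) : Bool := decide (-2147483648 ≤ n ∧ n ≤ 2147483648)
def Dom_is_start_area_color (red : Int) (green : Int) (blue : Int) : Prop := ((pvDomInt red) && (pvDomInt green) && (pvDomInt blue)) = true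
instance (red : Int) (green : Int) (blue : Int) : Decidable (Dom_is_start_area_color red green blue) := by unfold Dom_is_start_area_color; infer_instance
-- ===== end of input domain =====

-- B replaces A's build-then-sort of [distance, name] pairs by directly comparing Green's
-- distance with Red's and Yellow's (<= encodes the sort's alphabetical tie-break): simpler.

-- ===== PORT A =====
-- sum([abs(c1 - c2) for c1, c2 in zip(color1, color2)])  (tuples ported as List Int)
def color_difference (color1 color2 : List Int) : Int :=
  ((color1.zip color2).map (fun p => |p.1 - p.2|)).sum

def is_start_area_color (red : Int) (green : Int) (blue : Int) : Bool :=
  let target_colors : List (String × List Int) :=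
    [("Red", [255, 0, 0]), ("Yellow", [255, 255, 0]), ("Green", [0, 200, 0])]
  let my_color : List Int := [red, green, blue]
  let differences : List (Int × String) :=
    target_colors.map (fun p => (color_difference my_color p.2, p.1))
  -- differences.sort(): Python's lexicographic list order = sort by (distance, name)
  let sortedD := PySem.List.sorted2 differences (·.1) (·.2)
  (PySem.List.pyGetD sortedD 0 (0, "")).2 == "Green"   -- differences[0][1] == "Green" (list has 3 elements, index 0 in range)

-- ===== PORT B =====
def is_start_area_color_alt (red : Int) (green : Int) (blue : Int) : Bool :=
  let green_dist := |red - 0| + |green - 200| + |blue - 0|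
  let red_dist := |red - 255| + |green - 0| + |blue - 0|
  let yellow_dist := |red - 255| + |green - 255| + |blue - 0|
  decide (green_dist ≤ red_dist ∧ green_dist ≤ yellow_dist)

-- ===== PRECONDITION & SPEC =====
def Spec_is_start_area_color (red : Int) (green : Int) (blue : Int) (out : Bool) : Prop := out = is_start_area_color_alt red green blue
instance (red : Int) (green : Int) (blue : Int) (out : Bool) : Decidable (Spec_is_start_area_color red green blue out) := by unfold Spec_is_start_area_color; infer_instance

-- ===== CLAIM (what is proved, stated in full; the proofs are below) =====
def Claim_equal_is_start_area_color : Prop := ∀ (red : Int) (green : Int) (blue : Int), Dom_is_start_area_color red green blue → Spec_is_start_area_color red green blue (is_start_area_color red green blue)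

-- ===== LEMMAS AND PROOFS =====

-- The head of Python's sort of [(x,"Red"),(y,"Yellow"),(z,"Green")] is named "Green"
-- exactly when z ≤ x and z ≤ y ("Green" sorts first on distance ties).
set_option maxHeartbeats 2000000 in
theorem head_sort_green (x y z : Int) :
    ((PySem.List.pyGetD (PySem.List.sorted2 [(x, "Red"), (y, "Yellow"), (z, "Green")] (·.1) (·.2)) 0 ((0 : Int), "")).2 == "Green")
      = decide (z ≤ x ∧ z ≤ y) := by
  have hYR : decide (("Yellow" : String) < "Red") = false := by simp [pysem]; decide
  have hGR : decide (("Green" : String) < "Red") = true := by simp [pysem]; decide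
  have hGY : decide (("Green" : String) < "Yellow") = true := by simp [pysem]; decide
  simp only [PySem.List.sorted2, List.foldl, Bool.false_eq_true, if_false, PySem.List.insertBy,
    hYR, Bool.and_false, Bool.or_false]
  by_cases hyx : y < x
  · have hd : decide (y < x) = true := by simpa using hyx
    simp only [hd, if_true, PySem.List.insertBy, hGY, Bool.and_true]
    by_cases hzy : z ≤ y
    · have hc : (decide (z < y) || !decide (y < z)) = true := by simp; omega
      simp only [hc, if_true, PySem.List.pyGetD, PySem.List.pyGet?, PySem.List.pyIdx?]
      simp; omega
    · have hc : (decide (z < y) || !decide (y < z)) = false := by simp; omega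
      simp only [hc, Bool.false_eq_true, if_false, PySem.List.pyGetD, PySem.List.pyGet?, PySem.List.pyIdx?]
      simp; omega
  · have hd : decide (y < x) = false := by simpa using hyx
    simp only [hd, Bool.false_eq_true, if_false, PySem.List.insertBy, hGR, Bool.and_true]
    by_cases hzx : z ≤ x
    · have hc : (decide (z < x) || !decide (x < z)) = true := by simp; omega
      simp only [hc, if_true, PySem.List.pyGetD, PySem.List.pyGet?, PySem.List.pyIdx?]
      simp; omega
    · have hc : (decide (z < x) || !decide (x < z)) = false := by simp; omega
      simp only [hc, Bool.false_eq_true, if_false, PySem.List.pyGetD, PySem.List.pyGet?, PySem.List.pyIdx?]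
      simp; omega

-- ===== VERDICT (by name: the statement is the Claim_ definition above) =====
theorem is_start_area_color_spec : Claim_equal_is_start_area_color := by
  intro red green blue _
  unfold Spec_is_start_area_color is_start_area_color is_start_area_color_alt color_difference
  simp only [List.map, List.zip, List.zipWith, List.sum_cons, List.sum_nil, add_zero, sub_zero]
  rw [head_sort_green]
  congr 1
  rw [eq_iff_iff]
  omega
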